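-- pv_equiv track=rewrite | github.com/Alinabuss/OCEL_extractor_v2 | 2_Extractor_instance/2_HEU_HEU_extractor_instance/Refiner_subcomponent/Modularized_functions/.ipynb_checkpoints/Event_Object_Type_refiner-checkpoint.py | extract_relevant_objects_for_replacement_per_event_type_count_group
-- ===== SOURCE A (Python) =====
-- def extract_relevant_objects_for_replacement_per_event_type_count_group(event_type_objects, grouped_event_types):
--     # Create a dictionary to store relevant objects for each event type and count group
--     relevant_objects = {}
--
--     # Iterate through the event_type_objects to find relevant objects
--     for event_type, obj_lists in event_type_objects.items():
--         if event_type in grouped_event_types: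
--             # Get the count groups for the current event type
--             count_groups = grouped_event_types[event_type]
--             relevant_objects[event_type] = {}
--
--             for count, obj_dicts in count_groups.items():
--                 # Find relevant objects for the specific count group
--                 relevant_objects[event_type][count] = []
--                 for obj_dict in obj_lists:
--                     if len(obj_dict) == count and 'Object_type_not_identified' in obj_dict.values():
--                         relevant_objects[event_type][count].append(obj_dict)
--
--     return relevant_objects
-- ===== SOURCE B (Python) =====
-- def extract_relevant_objects_for_replacement_per_event_type_count_group(event_type_objects, grouped_event_types):
--     # One bucketing pass per event type (dict keyed on obj_dict length), then each
--     # count group is a single lookup; the result is built by dict comprehensions.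
--     marker = 'Object_type_not_identified'
--
--     def count_groups_for(obj_lists, counts):
--         buckets = {}
--         for obj_dict in obj_lists:
--             if marker in obj_dict.values():
--                 buckets.setdefault(len(obj_dict), []).append(obj_dict)
--         return {count: buckets.get(count, []) for count in counts}
--
--     return {event_type: count_groups_for(obj_lists, grouped_event_types[event_type])
--             for event_type, obj_lists in event_type_objects.items()
--             if event_type in grouped_event_types}
-- ===== Notes on version B (the rewrite author's own statement) =====
-- stated objective: faster
-- what changed: Instead of rescanning all obj_dicts once per count group, B buckets each event type's flagged obj_dicts by length in one pass and builds the result with dict comprehensions, each count group becoming a single lookup.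
import Mathlib
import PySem

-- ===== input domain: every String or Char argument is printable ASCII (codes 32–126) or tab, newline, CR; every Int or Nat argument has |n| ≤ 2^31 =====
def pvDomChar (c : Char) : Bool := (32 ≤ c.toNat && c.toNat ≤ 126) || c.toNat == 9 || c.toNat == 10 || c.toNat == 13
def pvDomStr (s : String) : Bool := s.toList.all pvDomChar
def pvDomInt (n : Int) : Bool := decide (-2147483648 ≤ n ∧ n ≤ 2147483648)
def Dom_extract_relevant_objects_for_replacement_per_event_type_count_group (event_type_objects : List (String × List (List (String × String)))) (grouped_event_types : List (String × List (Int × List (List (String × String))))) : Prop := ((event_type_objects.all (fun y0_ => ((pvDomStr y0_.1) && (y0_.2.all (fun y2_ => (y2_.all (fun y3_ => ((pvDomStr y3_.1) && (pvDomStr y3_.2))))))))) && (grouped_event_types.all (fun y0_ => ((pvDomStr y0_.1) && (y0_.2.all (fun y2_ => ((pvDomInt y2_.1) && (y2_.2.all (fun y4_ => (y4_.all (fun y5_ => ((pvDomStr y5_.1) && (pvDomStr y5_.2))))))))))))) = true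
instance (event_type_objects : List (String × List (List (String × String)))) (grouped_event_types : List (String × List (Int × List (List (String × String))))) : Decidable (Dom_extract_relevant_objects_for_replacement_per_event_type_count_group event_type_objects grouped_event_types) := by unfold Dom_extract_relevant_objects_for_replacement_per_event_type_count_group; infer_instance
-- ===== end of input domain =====

-- B replaces A's rescan of all obj_dicts per count group by one bucketing pass per event type
-- (dict keyed on length) and builds the result by comprehensions (filter+map) instead of
-- dict-insert loops.

-- ===== PORT A =====
-- inner loop of A: 'for obj_dict in obj_lists: if len(obj_dict) == count and marker in obj_dict.values(): append'
def pvA_inner (obj_lists : List (List (String × String))) (count : Int) : List (List (String × String)) :=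
  obj_lists.foldl (fun acc od =>
    if ((od.length : Int) == count && od.any (fun p => p.2 == "Object_type_not_identified")) then acc ++ [od] else acc) []

def extract_relevant_objects_for_replacement_per_event_type_count_group (event_type_objects : List (String × List (List (String × String)))) (grouped_event_types : List (String × List (Int × List (List (String × String))))) : List (String × List (Int × List (List (String × String)))) :=
  (event_type_objects.foldl (fun r p =>
    let gd := PySem.Dict.mk grouped_event_types
    if gd.contains p.1 then
      let count_groups := gd.getD p.1 []
      r.insert p.1 ((count_groups.foldl (fun d cg => d.insert cg.1 (pvA_inner p.2 cg.1)) PySem.Dict.empty).items)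
    else r) PySem.Dict.empty).items

-- ===== PORT B =====
-- B's bucketing loop: 'for obj_dict in obj_lists: if marker in obj_dict.values(): buckets.setdefault(len(obj_dict), []).append(obj_dict)'
def pvB_buckets (obj_lists : List (List (String × String))) : PySem.Dict Int (List (List (String × String))) :=
  obj_lists.foldl (fun b od =>
    if od.any (fun p => p.2 == "Object_type_not_identified") then b.modify (od.length : Int) [] (· ++ [od]) else b) PySem.Dict.empty

-- helper count_groups_for: the bucketing pass, then the comprehension '{count: buckets.get(count, []) for count in counts}'
def pvB_count_groups_for (obj_lists : List (List (String × String))) (counts : List (Int × List (List (String × String)))) : List (Int × List (List (String × String))) :=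
  let buckets := pvB_buckets obj_lists
  counts.map (fun cg => (cg.1, buckets.getD cg.1 []))

-- the outer dict comprehension with its 'if event_type in grouped_event_types' filter
def extract_relevant_objects_for_replacement_per_event_type_count_group_alt (event_type_objects : List (String × List (List (String × String)))) (grouped_event_types : List (String × List (Int × List (List (String × String))))) : List (String × List (Int × List (List (String × String)))) :=
  (event_type_objects.filter (fun p => (PySem.Dict.mk grouped_event_types).contains p.1)).map
    (fun p => (p.1, pvB_count_groups_for p.2 ((PySem.Dict.mk grouped_event_types).getD p.1 [])))

-- ===== PRECONDITION & SPEC =====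
-- Pre_ only requires each association list to have distinct keys — these lists encode Python
-- dicts, which can never carry duplicate keys, so no Python input is excluded.
def Pre_extract_relevant_objects_for_replacement_per_event_type_count_group (event_type_objects : List (String × List (List (String × String)))) (grouped_event_types : List (String × List (Int × List (List (String × String))))) : Prop :=
  (event_type_objects.map Prod.fst).Nodup ∧ ∀ g ∈ grouped_event_types, (g.2.map Prod.fst).Nodup
instance (event_type_objects : List (String × List (List (String × String)))) (grouped_event_types : List (String × List (Int × List (List (String × String))))) : Decidable (Pre_extract_relevant_objects_for_replacement_per_event_type_count_group event_type_objects grouped_event_types) := by unfold Pre_extract_relevant_objects_for_replacement_per_event_type_count_group; infer_instance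

def pvWitness_extract_relevant_objects_for_replacement_per_event_type_count_group : (List (String × List (List (String × String)))) × (List (String × List (Int × List (List (String × String))))) :=
  ([("e", [[("o1", "Object_type_not_identified")], [("o1", "x")]])], [("e", [(1, []), (2, [])])])

def Spec_extract_relevant_objects_for_replacement_per_event_type_count_group (event_type_objects : List (String × List (List (String × String)))) (grouped_event_types : List (String × List (Int × List (List (String × String))))) (out : List (String × List (Int × List (List (String × String))))) : Prop := out = extract_relevant_objects_for_replacement_per_event_type_count_group_alt event_type_objects grouped_event_types
instance (event_type_objects : List (String × List (List (String × String)))) (grouped_event_types : List (String × List (Int × List (List (String × String))))) (out : List (String × List (Int × List (List (String × String))))) : Decidable (Spec_extract_relevant_objects_for_replacement_per_event_type_count_group event_type_objects grouped_event_types out) := by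
  unfold Spec_extract_relevant_objects_for_replacement_per_event_type_count_group
  haveI d2 : DecidableEq (Int × List (List (String × String))) := instDecidableEqProd
  haveI d3 : DecidableEq (List (Int × List (List (String × String)))) := instDecidableEqList
  haveI d4 : DecidableEq (String × List (Int × List (List (String × String)))) := instDecidableEqProd
  haveI d5 : DecidableEq (List (String × List (Int × List (List (String × String))))) := instDecidableEqList
  exact d5 out _

-- ===== CLAIM (what is proved, stated in full; the proofs are below) =====
def Claim_equal_extract_relevant_objects_for_replacement_per_event_type_count_group : Prop := ∀ (event_type_objects : List (String × List (List (String × String)))) (grouped_event_types : List (String × List (Int × List (List (String × String))))), Dom_extract_relevant_objects_for_replacement_per_event_type_count_group event_type_objects grouped_event_types → Pre_extract_relevant_objects_for_replacement_per_event_type_count_group event_type_objects grouped_event_types → Spec_extract_relevant_objects_for_replacement_per_event_type_count_group event_type_objects grouped_event_types (extract_relevant_objects_for_replacement_per_event_type_count_group event_type_objects grouped_event_types)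

-- ===== LEMMAS AND PROOFS =====

-- a guarded fold is the fold over the filtered list
theorem foldl_if_filter {α β : Type} (c : α → Bool) (g : β → α → β) (L : List α) (d : β) :
    L.foldl (fun r a => if c a then g r a else r) d = (L.filter c).foldl g d := by
  induction L generalizing d with
  | nil => rfl
  | cons a t ih =>
    by_cases h : c a <;> simp [h, ih]

-- A's inner loop is a filter on the conjunction of the two tests.
theorem pvA_inner_eq_filter (obj_lists : List (List (String × String))) (count : Int) :
    pvA_inner obj_lists count
      = obj_lists.filter (fun od => (od.length : Int) == count && od.any (fun p => p.2 == "Object_type_not_identified")) := by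
  simpa using PySem.List.foldl_append_if_eq_filter
    (fun od => (od.length : Int) == count && od.any (fun p => p.2 == "Object_type_not_identified")) obj_lists []

-- what B's bucket dict holds at key c, for an arbitrary starting dict
theorem pvB_buckets_fold_getD (L : List (List (String × String))) (d : PySem.Dict Int (List (List (String × String)))) (c : Int) :
    (L.foldl (fun b od =>
        if od.any (fun p => p.2 == "Object_type_not_identified") then b.modify (od.length : Int) [] (· ++ [od]) else b) d).getD c []
      = d.getD c [] ++ L.filter (fun od => (od.length : Int) == c && od.any (fun p => p.2 == "Object_type_not_identified")) := by
  induction L generalizing d with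
  | nil => simp [List.filter]
  | cons od t ih =>
    simp only [List.foldl_cons, List.filter_cons]
    by_cases hm : od.any (fun p => p.2 == "Object_type_not_identified")
    · by_cases hc : (od.length : Int) = c
      · simp [hm, hc, ih]
      · have : ((od.length : Int) == c) = false := by simp [hc]
        simp [hm, this, ih, PySem.Dict.getD_modify, Ne.symm hc]
    · simp at hm
      simp [hm, ih]

theorem pvB_buckets_getD (obj_lists : List (List (String × String))) (c : Int) :
    (pvB_buckets obj_lists).getD c [] = pvA_inner obj_lists c := by
  rw [pvA_inner_eq_filter, pvB_buckets]
  simpa using pvB_buckets_fold_getD obj_lists PySem.Dict.empty c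

-- a first-match lookup that succeeds finds a member pair
theorem get?_mk_mem {κ ν : Type} [BEq κ] [LawfulBEq κ] (l : List (κ × ν)) (k : κ) (v : ν)
    (h : (PySem.Dict.mk l).get? k = some v) : (k, v) ∈ l := by
  induction l with
  | nil => simp [PySem.Dict.get?] at h
  | cons p t ih =>
    rw [show p = (p.1, p.2) from rfl, PySem.Dict.get?_mk_cons] at h
    by_cases hk : p.1 == k
    · simp [hk] at h
      have h1 : p = (k, v) := Prod.ext (by simpa using hk) h
      simp [h1]
    · simp [hk] at h
      exact List.mem_cons_of_mem _ (ih h)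

-- A's inner dict-building loop over distinct fresh count keys lists its entries in order
theorem pvA_inner_dict_items (obj_lists : List (List (String × String)))
    (counts : List (Int × List (List (String × String)))) (hnd : (counts.map Prod.fst).Nodup) :
    (counts.foldl (fun d cg => d.insert cg.1 (pvA_inner obj_lists cg.1)) PySem.Dict.empty).items
      = counts.map (fun cg => (cg.1, pvA_inner obj_lists cg.1)) := by
  have := PySem.Dict.items_foldl_insert_fresh (d := (PySem.Dict.empty : PySem.Dict Int (List (List (String × String)))))
    (l := counts) (k := Prod.fst) (v := fun cg => pvA_inner obj_lists cg.1)
    (by intro a _; simp [PySem.Dict.contains_empty]) hnd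
  simpa using this

-- ===== VERDICT (by name: the statement is the Claim_ definition above) =====

theorem extract_relevant_objects_for_replacement_per_event_type_count_group_spec : Claim_equal_extract_relevant_objects_for_replacement_per_event_type_count_group := by
  intro eto get _ hpre
  obtain ⟨hout, hin⟩ := hpre
  show _ = _
  unfold extract_relevant_objects_for_replacement_per_event_type_count_group
    extract_relevant_objects_for_replacement_per_event_type_count_group_alt
  rw [foldl_if_filter]
  have hA := PySem.Dict.items_foldl_insert_fresh
    (d := (PySem.Dict.empty : PySem.Dict String (List (Int × List (List (String × String))))))
    (l := eto.filter (fun p => (PySem.Dict.mk get).contains p.1))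
    (k := Prod.fst)
    (v := fun p => (((PySem.Dict.mk get).getD p.1 []).foldl
        (fun d cg => d.insert cg.1 (pvA_inner p.2 cg.1)) PySem.Dict.empty).items)
    (by intro a _; simp [PySem.Dict.contains_empty])
    (hout.sublist (List.filter_sublist.map Prod.fst))
  refine hA.trans ?_
  show [] ++ _ = _
  rw [List.nil_append]
  refine List.map_congr_left ?_
  intro p hp
  have hcounts : (((PySem.Dict.mk get).getD p.1 []).map Prod.fst).Nodup := by
    rcases h : (PySem.Dict.mk get).get? p.1 with _ | v
    · simp [PySem.Dict.getD_eq_get?_getD, h]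
    · have hv := get?_mk_mem get p.1 v h
      simpa [PySem.Dict.getD_eq_get?_getD, h] using hin (p.1, v) hv
  beta_reduce
  rw [pvA_inner_dict_items p.2 _ hcounts]
  unfold pvB_count_groups_for
  refine congrArg _ (List.map_congr_left ?_)
  intro cg _
  rw [pvB_buckets_getD]
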